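-- pv_equiv track=rewrite | github.com/pippot/Superadditive-cooperation-LLMs | nicerthanhumansmetrics.py | grim
-- ===== SOURCE A (Python) =====
-- def grim(opponent_moves):
--     moves = []
--     for t in range(len(opponent_moves)):
--         if any(m == 'defect' for m in opponent_moves[:t]):
--             moves.append('defect')
--         else:
--             moves.append('cooperate')
--     return moves
-- ===== SOURCE B (Python) =====
-- def grim(opponent_moves):
--     n = len(opponent_moves)
--     d = next((i for i, m in enumerate(opponent_moves) if m == 'defect'), None)
--     if d is None:
--         return ['cooperate'] * n
--     return ['cooperate'] * (d + 1) + ['defect'] * (n - d - 1)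
-- ===== Notes on version B (the rewrite author's own statement) =====
-- stated objective: faster
-- what changed: Replaces the per-step scan of the whole history prefix (any over opponent_moves[:t] for every t) with a single pass locating the first 'defect' index, then builds the answer as two replicated blocks.
import Mathlib
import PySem

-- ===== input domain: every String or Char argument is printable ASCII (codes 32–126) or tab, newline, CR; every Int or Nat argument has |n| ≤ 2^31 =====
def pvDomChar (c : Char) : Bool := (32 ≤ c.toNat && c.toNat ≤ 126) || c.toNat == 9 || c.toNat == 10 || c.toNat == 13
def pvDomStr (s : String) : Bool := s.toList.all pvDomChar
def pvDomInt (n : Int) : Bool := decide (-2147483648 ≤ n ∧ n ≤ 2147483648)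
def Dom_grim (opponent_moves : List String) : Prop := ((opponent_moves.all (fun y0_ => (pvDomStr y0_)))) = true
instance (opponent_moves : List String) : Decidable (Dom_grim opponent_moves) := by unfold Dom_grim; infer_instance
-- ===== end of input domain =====

-- B replaces A's quadratic per-step prefix scan by one lookup of the first-'defect'
-- index and two replicated blocks (objective: faster, O(n) vs O(n^2)).

-- ===== PORT A =====
-- for t in range(len(...)): append 'defect' if any m == 'defect' in opponent_moves[:t] else 'cooperate'
def grim (opponent_moves : List String) : List String :=
  (PySem.List.pyRange 0 (opponent_moves.length) 1).foldl
    (fun moves t =>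
      if (PySem.List.slice opponent_moves none (some t)).any (fun m => m == "defect") then
        moves ++ ["defect"]
      else
        moves ++ ["cooperate"])
    []

-- ===== PORT B =====
-- d = first index with move == 'defect' (none if absent); all-cooperate, or (d+1) cooperates then defects
def grim_alt (opponent_moves : List String) : List String :=
  match opponent_moves.findIdx? (fun m => m == "defect") with
  | none => List.replicate opponent_moves.length "cooperate"
  | some d =>
      List.replicate (d + 1) "cooperate" ++
      List.replicate (opponent_moves.length - d - 1) "defect"

-- ===== PRECONDITION & SPEC =====
def Spec_grim (opponent_moves : List String) (out : List String) : Prop := out = grim_alt opponent_moves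
instance (opponent_moves : List String) (out : List String) : Decidable (Spec_grim opponent_moves out) := by unfold Spec_grim; infer_instance

-- ===== CLAIM (what is proved, stated in full; the proofs are below) =====
def Claim_equal_grim : Prop := ∀ (opponent_moves : List String), Dom_grim opponent_moves → Spec_grim opponent_moves (grim opponent_moves)

-- ===== LEMMAS AND PROOFS =====

theorem pv_foldl_app (l : List Int) (f : Int → String) (acc : List String) :
    l.foldl (fun a t => a ++ [f t]) acc = acc ++ l.map f := by
  induction l generalizing acc with
  | nil => simp
  | cons x xs ih => simp [List.foldl_cons, ih]

theorem pv_grim_map (xs : List String) :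
    grim xs = (List.range xs.length).map
      (fun k => if (xs.take k).any (fun m => m == "defect") then "defect" else "cooperate") := by
  unfold grim
  have h1 : ∀ t, (if (PySem.List.slice xs none (some t)).any (fun m => m == "defect") then
        (fun moves => moves ++ ["defect"]) else (fun moves => moves ++ ["cooperate"])) =
      (fun moves => moves ++ [if (PySem.List.slice xs none (some t)).any (fun m => m == "defect") then "defect" else "cooperate"]) := by
    intro t; split <;> simp_all
  have : ((PySem.List.pyRange 0 (xs.length) 1).foldl
      (fun moves t =>
        if (PySem.List.slice xs none (some t)).any (fun m => m == "defect") then moves ++ ["defect"]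
        else moves ++ ["cooperate"]) []) =
      ((PySem.List.pyRange 0 (xs.length) 1).foldl
      (fun moves t => moves ++ [if (PySem.List.slice xs none (some t)).any (fun m => m == "defect") then "defect" else "cooperate"]) []) := by
    congr 1; funext moves t; split <;> simp_all
  rw [this, pv_foldl_app, PySem.List.pyRange_one]
  simp [List.map_map, Function.comp]

theorem grim_spec : Claim_equal_grim := by
  intro xs _
  unfold Spec_grim grim_alt
  rw [pv_grim_map]
  cases hf : xs.findIdx? (fun m => m == "defect") with
  | none =>
      have hnone := List.findIdx?_eq_none_iff.mp hf
      apply List.ext_getElem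
      · simp
      · intro k h1 h2
        simp only [List.getElem_map, List.getElem_range, List.getElem_replicate]
        have : (xs.take k).any (fun m => m == "defect") = false := by
          simp only [List.any_eq_false]
          intro x hx; simp [hnone x (List.mem_of_mem_take hx)]
        simp [this]
  | some d =>
      obtain ⟨hd, hpd, hprior⟩ := List.findIdx?_eq_some_iff_getElem.mp hf
      apply List.ext_getElem
      · simp; omega
      · intro k h1 h2
        simp only [List.getElem_map, List.getElem_range]
        have hk : k < xs.length := by simpa using h1
        by_cases hkd : k ≤ d
        · have hany : (xs.take k).any (fun m => m == "defect") = false := by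
            simp only [List.any_eq_false]
            intro x hx
            obtain ⟨j, hjk, hj⟩ := List.getElem_of_mem hx
            have hjlen : j < xs.length := by
              have := List.length_take_le k xs; omega
            have hjd : j < d := by
              have hj2 : j < k ∧ j < xs.length := by simpa using hjk
              omega
            have := hprior j hjd
            rw [List.getElem_take] at hj
            simp_all
          rw [hany]
          rw [List.getElem_append_left (by simp; omega)]
          simp
        · have hany : (xs.take k).any (fun m => m == "defect") = true := by
            simp only [List.any_eq_true]
            refine ⟨xs[d], ?_, by simpa using hpd⟩
            rw [List.mem_take_iff_getElem]
            exact ⟨d, by omega, by simp⟩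
          rw [hany]
          have hkge : d + 1 ≤ k := by omega
          rw [List.getElem_append_right (by simpa using hkge)]
          simp
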